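-- pv_equiv track=rewrite | github.com/therealkraus/learning | python/labs109.py | can_balance
-- ===== SOURCE A (Python) =====
-- def can_balance(items):
--     s = 0
--     for pos in range(len(items)):
--         for j, item in enumerate(items):
--             s += item * (j - pos)
--         if s == 0:
--             return pos
--         else:
--             s = 0
--     return -1
-- ===== SOURCE B (Python) =====
-- def can_balance(items):
--     W = sum(items)
--     M = sum(j * x for j, x in enumerate(items))
--     if W == 0:
--         return 0 if M == 0 and items else -1
--     q, r = divmod(M, W)
--     return q if r == 0 and 0 <= q < len(items) else -1
-- ===== Notes on version B (the rewrite author's own statement) =====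
-- stated objective: faster
-- what changed: A rescans the whole list for every candidate pivot (nested loops); B computes total weight W and total moment M in one pass and obtains the unique pivot as divmod(M, W) in closed form.
import Mathlib
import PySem

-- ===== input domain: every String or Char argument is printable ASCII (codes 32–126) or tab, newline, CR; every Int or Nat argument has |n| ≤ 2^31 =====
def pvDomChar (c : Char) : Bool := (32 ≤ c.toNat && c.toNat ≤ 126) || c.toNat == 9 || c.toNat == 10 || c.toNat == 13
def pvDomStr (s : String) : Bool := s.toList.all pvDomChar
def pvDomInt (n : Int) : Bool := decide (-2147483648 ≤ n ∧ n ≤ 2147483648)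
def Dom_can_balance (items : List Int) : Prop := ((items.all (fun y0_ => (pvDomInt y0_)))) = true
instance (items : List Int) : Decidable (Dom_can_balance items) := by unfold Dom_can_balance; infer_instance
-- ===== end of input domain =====

-- B replaces A's quadratic pivot scan with one pass computing total weight W and moment M,
-- then reads the pivot off as M // W in closed form (objective: faster, asymptotic).


-- ===== PORT A =====
-- inner loop: for j, item in enumerate(items): s += item * (j - pos)
def pvInnerA (items : List Int) (pos : Int) : Int :=
  (PySem.List.enumerate items).foldl (fun s ji => s + ji.2 * (ji.1 - pos)) 0

-- outer loop over range(len(items)) with early return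
def pvLoopA (items : List Int) : List Int → Int
  | [] => -1
  | p :: rest => if pvInnerA items p = 0 then p else pvLoopA items rest

def can_balance (items : List Int) : Int :=
  pvLoopA items (PySem.List.pyRange 0 items.length 1)

-- ===== PORT B =====
def can_balance_alt (items : List Int) : Int :=
  let W := items.sum
  let M := ((PySem.List.enumerate items).map (fun ji => ji.1 * ji.2)).sum
  if W = 0 then
    (if M = 0 ∧ items ≠ [] then 0 else -1)
  else
    match PySem.Int.divmod? M W with
    | some (q, r) => if r = 0 ∧ 0 ≤ q ∧ q < (items.length : Int) then q else -1
    | none => -1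

-- ===== PRECONDITION & SPEC =====
def Spec_can_balance (items : List Int) (out : Int) : Prop := out = can_balance_alt items
instance (items : List Int) (out : Int) : Decidable (Spec_can_balance items out) := by unfold Spec_can_balance; infer_instance

-- ===== CLAIM (what is proved, stated in full; the proofs are below) =====
def Claim_equal_can_balance : Prop := ∀ (items : List Int), Dom_can_balance items → Spec_can_balance items (can_balance items)

-- ===== LEMMAS AND PROOFS =====

-- the inner torque sum in closed form: M - pos * W
theorem pvInnerA_eq (items : List Int) (pos : Int) :
    pvInnerA items pos
      = ((PySem.List.enumerate items).map (fun ji => ji.1 * ji.2)).sum - pos * items.sum := by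
  unfold pvInnerA
  rw [PySem.List.foldl_add]
  have key : ∀ (l : List (Int × Int)),
      (l.map (fun ji => ji.2 * (ji.1 - pos))).sum
        = (l.map (fun ji => ji.1 * ji.2)).sum - pos * (l.map (·.2)).sum := by
    intro l
    induction l with
    | nil => simp
    | cons h t ih => simp [ih]; ring
  have := key (PySem.List.enumerate items)
  rw [PySem.List.map_snd_enumerate] at this
  simpa using this

-- if no position balances, the scan returns -1
theorem pvLoopA_none (items : List Int) (ps : List Int)
    (h : ∀ p ∈ ps, pvInnerA items p ≠ 0) : pvLoopA items ps = -1 := by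
  induction ps with
  | nil => rfl
  | cons p rest ih =>
    simp only [pvLoopA]
    rw [if_neg (h p (by simp))]
    exact ih (fun x hx => h x (by simp [hx]))

-- with a unique balancing position q, the scan returns q iff q is in the scanned list
theorem pvLoopA_unique (items : List Int) (q : Int) (ps : List Int)
    (h : ∀ p, pvInnerA items p = 0 ↔ p = q) :
    pvLoopA items ps = if q ∈ ps then q else -1 := by
  induction ps with
  | nil => rfl
  | cons p rest ih =>
    simp only [pvLoopA]
    by_cases hp : pvInnerA items p = 0
    · have : p = q := (h p).mp hp
      subst this
      simp [hp]
    · have hpq : p ≠ q := fun e => hp ((h p).mpr e)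
      rw [if_neg hp, ih]
      simp [List.mem_cons, hpq.symm]

-- ===== VERDICT (by name: the statement is the Claim_ definition above) =====
theorem can_balance_spec : Claim_equal_can_balance := by
  intro items _
  unfold Spec_can_balance can_balance can_balance_alt
  set W := items.sum with hW
  set M := ((PySem.List.enumerate items).map (fun ji => ji.1 * ji.2)).sum with hM
  simp only
  by_cases hW0 : W = 0
  · rw [if_pos hW0]
    by_cases hM0 : M = 0
    · -- every position balances
      rcases items with _ | ⟨x, xs⟩
      · simp [pvLoopA, hM0]
      · have hlen : (0:Int) < ((x :: xs).length : Int) := by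
          simp
        rw [PySem.List.pyRange_one_cons hlen, pvLoopA]
        rw [if_pos (by rw [pvInnerA_eq, ← hM, ← hW, hM0, hW0]; ring)]
        simp [hM0]
    · -- no position balances: inner sum is always M ≠ 0
      rw [if_neg (by simp [hM0])]
      exact pvLoopA_none items _ (fun p _ => by
        rw [pvInnerA_eq, ← hM, ← hW, hW0]; simpa using hM0)
  · rw [if_neg hW0]
    have hdm : PySem.Int.divmod? M W
        = some (PySem.Int.floordiv M W, PySem.Int.mod M W) := by
      simp [PySem.Int.divmod?, hW0, PySem.Int.floordiv, PySem.Int.mod]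
    rw [hdm]
    by_cases hr : PySem.Int.mod M W = 0
    · -- unique balancing position q = M // W
      have hdvd : W ∣ M := (PySem.Int.mod_eq_zero_iff_dvd M W).mp hr
      set q := PySem.Int.floordiv M W with hq
      have hqW : q * W = M := by
        have := PySem.Int.floordiv_mul_add_mod M W
        rw [hr] at this; simpa [← hq] using this
      have huniq : ∀ p, pvInnerA items p = 0 ↔ p = q := by
        intro p
        rw [pvInnerA_eq, ← hM, ← hW]
        constructor
        · intro h0
          have : p * W = M := by linarith
          have : p * W = q * W := by rw [this, hqW]
          exact mul_right_cancel₀ hW0 this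
        · intro h; subst h; rw [← hqW]; ring
      rw [pvLoopA_unique items q _ huniq]
      by_cases hqin : (0:Int) ≤ q ∧ q < (items.length : Int)
      · rw [if_pos (PySem.List.mem_pyRange_one.mpr ⟨hqin.1, hqin.2⟩)]
        simp [hr, hqin]
      · rw [if_neg (fun hmem => hqin ⟨(PySem.List.mem_pyRange_one.mp hmem).1,
          (PySem.List.mem_pyRange_one.mp hmem).2⟩)]
        simp only [hr]
        rw [if_neg (by tauto)]
    · -- W does not divide M: no position balances
      rw [pvLoopA_none items _ (fun p _ => by
        rw [pvInnerA_eq, ← hM, ← hW]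
        intro h0
        exact hr ((PySem.Int.mod_eq_zero_iff_dvd M W).mpr ⟨p, by linarith⟩))]
      simp [hr]
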